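-- pv_equiv track=rewrite | github.com/ZZZZZZZZeng/Code_Python | BlueBridge/MergeSort_SmallSum.py | right_method
-- ===== SOURCE A (Python) =====
-- def right_method(arr):
--     smallsum = 0
--     for i in range(len(arr)):
--         small = 0
--         for j in range(i):
--             small += arr[j] if arr[j] < arr[i] else 0
--         smallsum += small
--     return smallsum
-- ===== SOURCE B (Python) =====
-- def right_method(arr):
--     # Merge sort that accumulates the "small sum" during each merge: O(n log n).
--     def msort(a):
--         if len(a) <= 1:
--             return a, 0
--         mid = len(a) // 2
--         left, ls = msort(a[:mid])
--         right, rs = msort(a[mid:])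
--         merged = []
--         s = ls + rs
--         i = j = 0
--         while i < len(left) and j < len(right):
--             if left[i] < right[j]:
--                 s += left[i] * (len(right) - j)
--                 merged.append(left[i])
--                 i += 1
--             else:
--                 merged.append(right[j])
--                 j += 1
--         merged.extend(left[i:])
--         merged.extend(right[j:])
--         return merged, s
--     return msort(arr)[1]
-- ===== Notes on version B (the rewrite author's own statement) =====
-- stated objective: faster
-- what changed: Replaced the quadratic double loop over index pairs by a merge sort that accumulates each element's contribution (element times number of larger elements remaining on the right half) during the merges.
import Mathlib
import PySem

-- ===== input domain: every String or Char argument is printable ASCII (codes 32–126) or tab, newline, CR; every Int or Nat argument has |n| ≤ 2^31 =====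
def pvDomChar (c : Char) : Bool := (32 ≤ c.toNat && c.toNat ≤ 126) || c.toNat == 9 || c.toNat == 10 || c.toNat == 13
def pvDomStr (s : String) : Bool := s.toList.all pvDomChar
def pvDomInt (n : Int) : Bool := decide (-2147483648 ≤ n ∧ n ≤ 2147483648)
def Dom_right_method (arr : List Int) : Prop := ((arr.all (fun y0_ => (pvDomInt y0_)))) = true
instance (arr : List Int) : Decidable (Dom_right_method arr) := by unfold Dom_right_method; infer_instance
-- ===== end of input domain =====

-- B replaces A's quadratic double loop by a merge sort that accumulates the small sum
-- during the merges (objective: faster, asymptotic).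

-- ===== PORT A =====
def right_method (arr : List Int) : Int :=
  (PySem.List.pyRange 0 (arr.length : Int) 1).foldl
    (fun smallsum i =>
      smallsum +
        (PySem.List.pyRange 0 i 1).foldl
          (fun small j =>
            small + (if PySem.List.pyGetD arr j 0 < PySem.List.pyGetD arr i 0
                     then PySem.List.pyGetD arr j 0 else 0)) 0) 0

-- ===== PORT B =====
-- merge loop of Source B: structural recursion on the two remaining (sorted) runs;
-- when left[i] < right[j] it adds left[i] * (number of right elements not yet merged)
def mergeCnt : List Int → List Int → List Int × Int
  | [], ys => (ys, 0)
  | x :: xs, [] => (x :: xs, 0)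
  | x :: xs, y :: ys =>
    if x < y then
      let p := mergeCnt xs (y :: ys)
      (x :: p.1, x * ((ys.length : Int) + 1) + p.2)
    else
      let p := mergeCnt (x :: xs) ys
      (y :: p.1, p.2)

-- a[:mid] / a[mid:] with 0 ≤ mid = len//2 ≤ len are exactly take/drop
def msortCnt (a : List Int) : List Int × Int :=
  if a.length ≤ 1 then (a, 0)
  else
    let mid := a.length / 2
    let l := msortCnt (a.take mid)
    let r := msortCnt (a.drop mid)
    let m := mergeCnt l.1 r.1
    (m.1, l.2 + r.2 + m.2)
termination_by a.length
decreasing_by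
  · simp only [List.length_take]; omega
  · simp only [List.length_drop]; omega

def right_method_alt (arr : List Int) : Int := (msortCnt arr).2

-- ===== PRECONDITION & SPEC =====
def Spec_right_method (arr : List Int) (out : Int) : Prop := out = right_method_alt arr
instance (arr : List Int) (out : Int) : Decidable (Spec_right_method arr out) := by unfold Spec_right_method; infer_instance

-- ===== CLAIM (what is proved, stated in full; the proofs are below) =====
def Claim_equal_right_method : Prop := ∀ (arr : List Int), Dom_right_method arr → Spec_right_method arr (right_method arr)

-- ===== LEMMAS AND PROOFS =====

-- the reference value: S xs = sum over positions j of xs[j] * |{i > j : xs[j] < xs[i]}|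
def S : List Int → Int
  | [] => 0
  | x :: l => x * (l.countP (fun b => decide (x < b))) + S l

def cross (l r : List Int) : Int :=
  (l.map (fun a => a * (r.countP (fun b => decide (a < b))))).sum

lemma S_append (l r : List Int) : S (l ++ r) = S l + S r + cross l r := by
  induction l with
  | nil => simp [S, cross]
  | cons x l ih =>
      simp only [List.cons_append, S, ih, List.countP_append, cross, List.map_cons,
        List.sum_cons]
      push_cast
      ring

lemma cross_perm {l l' r r' : List Int} (hl : l.Perm l') (hr : r.Perm r') :
    cross l r = cross l' r' := by
  unfold cross
  have h1 : ∀ a : Int, r.countP (fun b => decide (a < b)) = r'.countP (fun b => decide (a < b)) :=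
    fun a => hr.countP_eq _
  calc (l.map (fun a => a * (r.countP (fun b => decide (a < b))))).sum
      = (l.map (fun a => a * (r'.countP (fun b => decide (a < b))))).sum := by
        simp only [h1]
    _ = (l'.map (fun a => a * (r'.countP (fun b => decide (a < b))))).sum :=
        (hl.map _).sum_eq

lemma mergeCnt_perm : ∀ (l r : List Int), (mergeCnt l r).1.Perm (l ++ r)
  | [], ys => by simp [mergeCnt]
  | x :: xs, [] => by simp [mergeCnt]
  | x :: xs, y :: ys => by
    rw [mergeCnt]
    by_cases h : x < y
    · simpa [h] using (mergeCnt_perm xs (y :: ys)).cons x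
    · simp only [h, if_false]
      exact ((mergeCnt_perm (x :: xs) ys).cons y).trans List.perm_middle.symm

lemma mergeCnt_sorted : ∀ (l r : List Int), l.Pairwise (· ≤ ·) → r.Pairwise (· ≤ ·) →
    (mergeCnt l r).1.Pairwise (· ≤ ·)
  | [], ys, _, hr => by simpa [mergeCnt] using hr
  | x :: xs, [], hl, _ => by simpa [mergeCnt] using hl
  | x :: xs, y :: ys, hl, hr => by
    rw [mergeCnt]
    by_cases h : x < y
    · simp only [h, if_true]
      refine List.Pairwise.cons ?_ (mergeCnt_sorted xs (y :: ys) hl.of_cons hr)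
      intro z hz
      rcases List.mem_append.mp ((mergeCnt_perm xs (y :: ys)).mem_iff.mp hz) with h1 | h2
      · exact List.rel_of_pairwise_cons hl h1
      · rcases List.mem_cons.mp h2 with rfl | h3
        · exact le_of_lt h
        · exact le_of_lt (lt_of_lt_of_le h (List.rel_of_pairwise_cons hr h3))
    · simp only [h, if_false]
      have hyx : y ≤ x := le_of_not_gt h
      refine List.Pairwise.cons ?_ (mergeCnt_sorted (x :: xs) ys hl hr.of_cons)
      intro z hz
      rcases List.mem_append.mp ((mergeCnt_perm (x :: xs) ys).mem_iff.mp hz) with h1 | h2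
      · rcases List.mem_cons.mp h1 with rfl | h3
        · exact hyx
        · exact hyx.trans (List.rel_of_pairwise_cons hl h3)
      · exact List.rel_of_pairwise_cons hr h2

lemma mergeCnt_snd : ∀ (l r : List Int), l.Pairwise (· ≤ ·) → r.Pairwise (· ≤ ·) →
    (mergeCnt l r).2 = cross l r
  | [], ys, _, _ => by simp [mergeCnt, cross]
  | x :: xs, [], _, _ => by simp [mergeCnt, cross]
  | x :: xs, y :: ys, hl, hr => by
    rw [mergeCnt]
    by_cases h : x < y
    · simp only [h, if_true]
      have hall : (y :: ys).countP (fun b => decide (x < b)) = (y :: ys).length := by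
        apply List.countP_eq_length.mpr
        intro b hb
        rcases List.mem_cons.mp hb with rfl | hb'
        · simpa using h
        · simpa using lt_of_lt_of_le h (List.rel_of_pairwise_cons hr hb')
      rw [mergeCnt_snd xs (y :: ys) hl.of_cons hr]
      simp only [cross, List.map_cons, List.sum_cons, hall, List.length_cons]
      push_cast
      ring
    · simp only [h, if_false]
      have key : ∀ a ∈ x :: xs,
          (y :: ys).countP (fun b => decide (a < b)) = ys.countP (fun b => decide (a < b)) := by
        intro a ha
        have hya : y ≤ a := by
          rcases List.mem_cons.mp ha with rfl | h3
          · exact le_of_not_gt h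
          · exact (le_of_not_gt h).trans (List.rel_of_pairwise_cons hl h3)
        simp [not_lt_of_ge hya]
      rw [mergeCnt_snd (x :: xs) ys hl hr.of_cons]
      unfold cross
      congr 1
      apply List.map_congr_left
      intro a ha
      rw [key a ha]

lemma msortCnt_spec : ∀ (n : Nat) (xs : List Int), xs.length ≤ n →
    (msortCnt xs).1.Perm xs ∧ (msortCnt xs).1.Pairwise (· ≤ ·) ∧ (msortCnt xs).2 = S xs := by
  intro n
  induction n with
  | zero =>
      intro xs hxs
      have : xs = [] := List.length_eq_zero_iff.mp (Nat.le_zero.mp hxs)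
      subst this
      simp [msortCnt, S]
  | succ n ih =>
      intro xs hxs
      by_cases hlen : xs.length ≤ 1
      · rw [msortCnt, if_pos hlen]
        rcases xs with _ | ⟨a, _ | ⟨b, t⟩⟩
        · simp [S]
        · simp [S]
        · simp at hlen
      · rw [msortCnt, if_neg hlen]
        have h2 : 2 ≤ xs.length := by omega
        have htk : (xs.take (xs.length / 2)).length ≤ n := by
          simp only [List.length_take]; omega
        have hdp : (xs.drop (xs.length / 2)).length ≤ n := by
          simp only [List.length_drop]; omega
        obtain ⟨pl, sl, vl⟩ := ih _ htk
        obtain ⟨pr, sr, vr⟩ := ih _ hdp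
        have hperm : (mergeCnt (msortCnt (xs.take (xs.length / 2))).1
            (msortCnt (xs.drop (xs.length / 2))).1).1.Perm xs := by
          refine (mergeCnt_perm _ _).trans ?_
          refine (pl.append pr).trans ?_
          rw [List.take_append_drop]
        refine ⟨hperm, mergeCnt_sorted _ _ sl sr, ?_⟩
        show (msortCnt (xs.take (xs.length / 2))).2 + (msortCnt (xs.drop (xs.length / 2))).2 +
          (mergeCnt (msortCnt (xs.take (xs.length / 2))).1
            (msortCnt (xs.drop (xs.length / 2))).1).2 = S xs
        have hsnd := mergeCnt_snd _ _ sl sr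
        have hS : S xs = S (xs.take (xs.length / 2)) + S (xs.drop (xs.length / 2)) +
            cross (xs.take (xs.length / 2)) (xs.drop (xs.length / 2)) := by
          conv_lhs => rw [← List.take_append_drop (xs.length / 2) xs]
          exact S_append _ _
        rw [hsnd, vl, vr, hS, cross_perm pl pr]

-- ===== characterisation of A =====

lemma inner_eq (arr : List Int) (c : Int) : ∀ (i : Nat), i ≤ arr.length →
    (PySem.List.pyRange 0 (i : Int) 1).foldl
      (fun small j =>
        small + (if PySem.List.pyGetD arr j 0 < c then PySem.List.pyGetD arr j 0 else 0)) 0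
    = ((arr.take i).filter (fun v => decide (v < c))).sum := by
  intro i
  induction i with
  | zero => simp [PySem.List.pyRange_one_eq_nil]
  | succ i ih =>
      intro hi
      have hii : i ≤ arr.length := by omega
      have hlt : i < arr.length := by omega
      have hcast : ((i + 1 : Nat) : Int) = (i : Int) + 1 := by push_cast; ring
      rw [hcast, PySem.List.pyRange_one_succ_right (by positivity), List.foldl_append]
      rw [ih hii]
      have hget : PySem.List.pyGetD arr (i : Int) 0 = arr[i] := by
        rw [PySem.List.pyGetD_natCast]
        exact List.getD_eq_getElem arr 0 hlt
      have htake : arr.take (i + 1) = arr.take i ++ [arr[i]] := by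
        rw [List.take_add_one]
        simp [List.getElem?_eq_getElem hlt]
      rw [htake]
      simp only [List.foldl_cons, List.foldl_nil, List.filter_append, List.sum_append,
        List.filter_cons, hget]
      by_cases hc : arr[i] < c
      · simp [hc]
      · simp [hc]

lemma map_ite_sum (l : List Int) (x : Int) :
    (l.map (fun a => if a < x then a else 0)).sum = (l.filter (fun v => decide (v < x))).sum := by
  induction l with
  | nil => simp
  | cons a l ih => by_cases h : a < x <;> simp [h, ih]

lemma cross_singleton (xs : List Int) (x : Int) :
    cross xs [x] = (xs.filter (fun v => decide (v < x))).sum := by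
  unfold cross
  have h : ∀ a : Int,
      a * ((List.countP (fun b => decide (a < b)) [x] : Nat) : Int) = if a < x then a else 0 := by
    intro a; by_cases h : a < x <;> simp [h]
  simp only [h]
  exact map_ite_sum xs x

lemma S_snoc (xs : List Int) (x : Int) :
    S (xs ++ [x]) = S xs + (xs.filter (fun v => decide (v < x))).sum := by
  rw [S_append, cross_singleton]
  simp [S]

lemma G_eq_S (arr : List Int) :
    ((List.range arr.length).map
      (fun i => ((arr.take i).filter (fun v => decide (v < arr.getD i 0))).sum)).sum = S arr := by
  induction arr using List.reverseRecOn with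
  | nil => simp [S]
  | append_singleton xs x ih =>
      have hlen : (xs ++ [x]).length = xs.length + 1 := by simp
      rw [hlen, List.range_succ, List.map_append, List.sum_append, S_snoc]
      have hterm : ((xs ++ [x]).take xs.length).filter (fun v => decide (v < (xs ++ [x]).getD xs.length 0))
          = xs.filter (fun v => decide (v < x)) := by
        rw [List.take_left]
        congr 1
        simp [List.getD]
      have hmap : (List.range xs.length).map
          (fun i => (((xs ++ [x]).take i).filter (fun v => decide (v < (xs ++ [x]).getD i 0))).sum)
          = (List.range xs.length).map
          (fun i => ((xs.take i).filter (fun v => decide (v < xs.getD i 0))).sum) := by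
        apply List.map_congr_left
        intro i hi
        have hi' : i < xs.length := List.mem_range.mp hi
        rw [List.take_append_of_le_length (le_of_lt hi')]
        congr 2
        unfold List.getD
        rw [List.getElem?_append_left hi']
      rw [hmap, ih]
      simp only [List.map_cons, List.map_nil, List.sum_cons, List.sum_nil, add_zero]
      rw [hterm]

lemma A_eq_S (arr : List Int) : right_method arr = S arr := by
  unfold right_method
  rw [PySem.List.pyRange_zero_natCast]
  rw [List.foldl_map]
  rw [PySem.List.foldl_add]
  simp only [zero_add]
  have hmap : (List.range arr.length).map
      (fun (i : Nat) =>
        (PySem.List.pyRange 0 ((i : Int)) 1).foldl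
          (fun small j =>
            small + (if PySem.List.pyGetD arr j 0 < PySem.List.pyGetD arr (i : Int) 0
                     then PySem.List.pyGetD arr j 0 else 0)) 0)
      = (List.range arr.length).map
      (fun (i : Nat) => ((arr.take i).filter (fun v => decide (v < arr.getD i 0))).sum) := by
    apply List.map_congr_left
    intro i hi
    have hlt : i < arr.length := List.mem_range.mp hi
    rw [inner_eq arr (PySem.List.pyGetD arr (i : Int) 0) i (le_of_lt hlt)]
    have : PySem.List.pyGetD arr (i : Int) 0 = arr.getD i 0 := PySem.List.pyGetD_natCast arr i 0
    rw [this]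
  rw [hmap]
  exact G_eq_S arr

-- ===== VERDICT (by name: the statement is the Claim_ definition above) =====
theorem right_method_spec : Claim_equal_right_method := by
  intro arr _
  unfold Spec_right_method right_method_alt
  rw [A_eq_S, (msortCnt_spec arr.length arr le_rfl).2.2]
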